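-- pv_equiv track=rewrite | github.com/kaczla/list-apps | scripts/sort_readme.py | _sort_tags
-- ===== SOURCE A (Python) =====
-- from copy import deepcopy
-- from typing import Dict, List, Optional, Tuple
--
-- def _sort_tags(tags: List[str]) -> List[str]:
--     source_tags = []
--     command_line_tags = []
--     tags_copy = deepcopy(tags)
--     tags_to_remove = []
--     for tag in tags_copy:
--         if tag.lower().startswith("source: "):
--             source_tags.append(tag)
--             tags_to_remove.append(tag)
--
--         elif tag.lower().startswith("command line: "):
--             command_line_tags.append(tag)
--             tags_to_remove.append(tag)
--
--     for tag_to_remove in tags_to_remove: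
--         tags_copy.remove(tag_to_remove)
--
--     return tags_copy + command_line_tags + source_tags
-- ===== SOURCE B (Python) =====
-- def _sort_tags(tags):
--     def priority(tag):
--         t = tag.lower()
--         if t.startswith("source: "):
--             return 2
--         if t.startswith("command line: "):
--             return 1
--         return 0
--     return sorted(tags, key=priority)
-- ===== Notes on version B (the rewrite author's own statement) =====
-- stated objective: simpler
-- what changed: Replaces the two explicit loops plus repeated list.remove partitioning with a single stable sort by a 3-valued priority key (other=0, command line=1, source=2).
import Mathlib
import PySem

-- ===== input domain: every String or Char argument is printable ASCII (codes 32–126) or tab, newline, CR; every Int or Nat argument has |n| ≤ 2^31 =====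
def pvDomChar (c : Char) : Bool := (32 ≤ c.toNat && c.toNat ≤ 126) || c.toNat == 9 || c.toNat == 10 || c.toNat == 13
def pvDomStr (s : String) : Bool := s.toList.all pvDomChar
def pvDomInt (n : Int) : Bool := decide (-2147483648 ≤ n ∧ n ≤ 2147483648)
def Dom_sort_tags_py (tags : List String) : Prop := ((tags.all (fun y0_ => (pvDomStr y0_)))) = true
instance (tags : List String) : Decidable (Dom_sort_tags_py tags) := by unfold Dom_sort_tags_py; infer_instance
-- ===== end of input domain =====

-- B replaces A's two explicit loops plus repeated list.remove partitioning by one stable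
-- sort with a 3-valued priority key (objective: simpler). Return-value equivalence only
-- (A copies its argument, neither mutates the caller's list).

-- ===== PORT A =====
-- loop body of A's first for-loop: state = (source_tags, command_line_tags, tags_to_remove)
def sortTagsStepA (st : List String × List String × List String) (tag : String) :
    List String × List String × List String :=
  if PySem.Str.startswith (PySem.Str.lower tag) "source: " then
    (st.1 ++ [tag], st.2.1, st.2.2 ++ [tag])
  else if PySem.Str.startswith (PySem.Str.lower tag) "command line: " then
    (st.1, st.2.1 ++ [tag], st.2.2 ++ [tag])
  else st

def sort_tags_py (tags : List String) : List String :=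
  let st := tags.foldl sortTagsStepA ([], [], [])
  -- second loop: tags_copy.remove(tag_to_remove); the removed value is always present
  -- (each append to tags_to_remove comes from one occurrence), so remove? never returns
  -- none here; the getD fallback is unreachable.
  let tags_copy := st.2.2.foldl (fun l t => (PySem.List.remove? l t).getD l) tags
  tags_copy ++ st.2.1 ++ st.1

-- ===== PORT B =====
def sortTagsPriority (tag : String) : Int :=
  if PySem.Str.startswith (PySem.Str.lower tag) "source: " then 2
  else if PySem.Str.startswith (PySem.Str.lower tag) "command line: " then 1
  else 0

def sort_tags_py_alt (tags : List String) : List String :=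
  PySem.List.sorted tags sortTagsPriority false

-- ===== PRECONDITION & SPEC =====
def Spec_sort_tags_py (tags : List String) (out : List String) : Prop := out = sort_tags_py_alt tags
instance (tags : List String) (out : List String) : Decidable (Spec_sort_tags_py tags out) := by unfold Spec_sort_tags_py; infer_instance

-- ===== CLAIM (what is proved, stated in full; the proofs are below) =====
def Claim_equal_sort_tags_py : Prop := ∀ (tags : List String), Dom_sort_tags_py tags → Spec_sort_tags_py tags (sort_tags_py tags)

-- ===== LEMMAS AND PROOFS =====

-- inserting x after a block of elements not key-above it, before a block strictly key-above it
theorem insertBy_middle {α : Type} (key : α → Int) (x : α) (a b : List α)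
    (ha : ∀ z ∈ a, ¬ key x < key z) (hb : ∀ z ∈ b, key x < key z) :
    PySem.List.insertBy (fun p q => decide (key p < key q)) x (a ++ b) = a ++ x :: b := by
  induction a with
  | nil =>
    cases b with
    | nil => simp [PySem.List.insertBy]
    | cons y ys => simp [PySem.List.insertBy, hb y (by simp)]
  | cons z a ih =>
    have hz : ¬ key x < key z := ha z (by simp)
    simp only [List.cons_append, PySem.List.insertBy]
    rw [if_neg (by simpa using hz)]
    exact congrArg (z :: ·) (ih fun w hw => ha w (by simp [hw]))

-- the stable insertion sort over a 3-valued key is the 3-way partition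
theorem foldl_insertBy_partition {α : Type} (key : α → Int)
    (hk : ∀ x : α, key x = 0 ∨ key x = 1 ∨ key x = 2) :
    ∀ (xs a b c : List α),
      (∀ z ∈ a, key z = 0) → (∀ z ∈ b, key z = 1) → (∀ z ∈ c, key z = 2) →
      List.foldl (fun acc x => PySem.List.insertBy (fun p q => decide (key p < key q)) x acc)
          (a ++ b ++ c) xs
        = (a ++ xs.filter (fun x => key x == 0)) ++ (b ++ xs.filter (fun x => key x == 1))
            ++ (c ++ xs.filter (fun x => key x == 2)) := by
  intro xs
  induction xs with
  | nil => intro a b c _ _ _; simp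
  | cons x xs ih =>
    intro a b c ha hb hc
    rcases hk x with h0 | h1 | h2
    · have : PySem.List.insertBy (fun p q => decide (key p < key q)) x (a ++ b ++ c)
          = (a ++ [x]) ++ b ++ c := by
        rw [List.append_assoc, insertBy_middle key x a (b ++ c)
          (fun z hz => by rw [ha z hz, h0]; omega)
          (fun z hz => by
            rcases List.mem_append.1 hz with h | h
            · rw [hb z h, h0]; omega
            · rw [hc z h, h0]; omega)]
        simp
      simp only [List.foldl_cons, this]
      rw [ih (a ++ [x]) b c
        (fun z hz => by rcases List.mem_append.1 hz with h | h
                        · exact ha z h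
                        · simp at h; subst h; exact h0) hb hc]
      simp [h0]
    · have : PySem.List.insertBy (fun p q => decide (key p < key q)) x (a ++ b ++ c)
          = a ++ (b ++ [x]) ++ c := by
        rw [insertBy_middle key x (a ++ b) c
          (fun z hz => by
            rcases List.mem_append.1 hz with h | h
            · rw [ha z h, h1]; omega
            · rw [hb z h, h1]; omega)
          (fun z hz => by rw [hc z hz, h1]; omega)]
        simp
      simp only [List.foldl_cons, this]
      rw [ih a (b ++ [x]) c ha
        (fun z hz => by rcases List.mem_append.1 hz with h | h
                        · exact hb z h
                        · simp at h; subst h; exact h1) hc]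
      simp [h1]
    · have : PySem.List.insertBy (fun p q => decide (key p < key q)) x (a ++ b ++ c)
          = a ++ b ++ (c ++ [x]) := by
        have h := insertBy_middle key x (a ++ b ++ c) []
          (fun z hz => by
            rcases List.mem_append.1 hz with h | h
            · rcases List.mem_append.1 h with h' | h'
              · rw [ha z h', h2]; omega
              · rw [hb z h', h2]; omega
            · rw [hc z h, h2]; omega)
          (fun z hz => by simp at hz)
        simpa using h
      simp only [List.foldl_cons, this]
      rw [ih a b (c ++ [x]) ha hb
        (fun z hz => by rcases List.mem_append.1 hz with h | h
                        · exact hc z h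
                        · simp at h; subst h; exact h2)]
      simp [h2]

theorem priority_cases (x : String) :
    sortTagsPriority x = 0 ∨ sortTagsPriority x = 1 ∨ sortTagsPriority x = 2 := by
  unfold sortTagsPriority
  split_ifs <;> simp

-- B computes the 3-way partition
theorem alt_eq_partition (tags : List String) :
    sort_tags_py_alt tags
      = tags.filter (fun x => sortTagsPriority x == 0)
        ++ tags.filter (fun x => sortTagsPriority x == 1)
        ++ tags.filter (fun x => sortTagsPriority x == 2) := by
  unfold sort_tags_py_alt
  rw [PySem.List.sorted_eq_foldl_insertBy]
  have := foldl_insertBy_partition sortTagsPriority priority_cases tags [] [] []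
    (by simp) (by simp) (by simp)
  simpa using this

-- A's first loop computes the three filters
theorem stepA_foldl (tags : List String) :
    ∀ (a b c : List String),
      tags.foldl sortTagsStepA (a, b, c)
        = (a ++ tags.filter (fun x => sortTagsPriority x == 2),
           b ++ tags.filter (fun x => sortTagsPriority x == 1),
           c ++ tags.filter (fun x => sortTagsPriority x ≠ 0)) := by
  induction tags with
  | nil => intro a b c; simp
  | cons x xs ih =>
    intro a b c
    by_cases hs : PySem.Str.startswith (PySem.Str.lower x) "source: " = true
    · have hk : sortTagsPriority x = 2 := by
        simp only [sortTagsPriority]; rw [if_pos hs]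
      have hstep : sortTagsStepA (a, b, c) x = (a ++ [x], b, c ++ [x]) := by
        simp only [sortTagsStepA]; rw [if_pos hs]
      simp only [List.foldl_cons, hstep, ih, List.filter_cons, hk]
      simp
    · by_cases hcmd : PySem.Str.startswith (PySem.Str.lower x) "command line: " = true
      · have hk : sortTagsPriority x = 1 := by
          simp only [sortTagsPriority]; rw [if_neg hs, if_pos hcmd]
        have hstep : sortTagsStepA (a, b, c) x = (a, b ++ [x], c ++ [x]) := by
          simp only [sortTagsStepA]; rw [if_neg hs, if_pos hcmd]
        simp only [List.foldl_cons, hstep, ih, List.filter_cons, hk]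
        simp
      · have hk : sortTagsPriority x = 0 := by
          simp only [sortTagsPriority]; rw [if_neg hs, if_neg hcmd]
        have hstep : sortTagsStepA (a, b, c) x = (a, b, c) := by
          simp only [sortTagsStepA]; rw [if_neg hs, if_neg hcmd]
        simp only [List.foldl_cons, hstep, ih, List.filter_cons, hk]
        simp

-- removing, one by one, the first occurrence of each p-element of xs leaves the ¬p-elements
theorem foldl_remove_filter {α : Type} [DecidableEq α] (p : α → Bool) :
    ∀ xs : List α,
      (xs.filter p).foldl (fun l t => (PySem.List.remove? l t).getD l) xs
        = xs.filter (fun x => ¬ p x) := by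
  have aux : ∀ (ts : List α) (x : α) (l : List α), (∀ t ∈ ts, t ≠ x) →
      ts.foldl (fun l t => (PySem.List.remove? l t).getD l) (x :: l)
        = x :: ts.foldl (fun l t => (PySem.List.remove? l t).getD l) l := by
    intro ts
    induction ts with
    | nil => intro x l _; rfl
    | cons t ts ih =>
      intro x l h
      have hne : x ≠ t := fun he => (h t (by simp)) he.symm
      simp only [List.foldl_cons, PySem.List.remove?_cons_of_ne l hne]
      cases hr : PySem.List.remove? l t with
      | none => simpa [hr] using ih x l (fun u hu => h u (by simp [hu]))
      | some l' => simpa [hr] using ih x l' (fun u hu => h u (by simp [hu]))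
  intro xs
  induction xs with
  | nil => rfl
  | cons x xs ih =>
    by_cases hp : p x = true
    · simp only [List.filter_cons, hp, if_true, List.foldl_cons,
        PySem.List.remove?_cons_self, Option.getD_some]
      simpa [hp] using ih
    · simp only [List.filter_cons, hp, Bool.false_eq_true, if_false]
      rw [aux (xs.filter p) x xs (fun t ht => by
        intro he; subst he
        exact hp (List.of_mem_filter ht))]
      simp [ih]

-- ===== VERDICT (by name: the statement is the Claim_ definition above) =====
theorem sort_tags_py_spec : Claim_equal_sort_tags_py := by
  intro tags _
  unfold Spec_sort_tags_py sort_tags_py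
  rw [alt_eq_partition]
  simp only [stepA_foldl tags [] [] [], List.nil_append]
  rw [foldl_remove_filter (fun x => sortTagsPriority x ≠ 0) tags]
  have hfe : tags.filter (fun x => ¬ decide (sortTagsPriority x ≠ 0))
      = tags.filter (fun x => sortTagsPriority x == 0) := by
    apply List.filter_congr
    intro x _
    by_cases h : sortTagsPriority x = 0 <;> simp [h]
  rw [hfe]
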